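-- pv_equiv track=rewrite | github.com/jaikaggarwal/evolang_2026 | Code/systematicity.py | generate_convex_partitions
-- ===== SOURCE A (Python) =====
-- def generate_convex_partitions(features):
--
--     num_features = len(features)
--     num_list = [i for i in range(num_features)]
--
--     def recursive_partitioning(curr_list, curr_depth):
--
--         all_partitions = []
--         base_partition = (curr_depth, ) * len(curr_list)
--         all_partitions.append(base_partition)
--
--         for i in range(1, len(curr_list)):
--             remaining = curr_list[i:]
--             sub_partitions = recursive_partitioning(remaining, curr_depth+1)
--             for partition in sub_partitions:
--                 new_base_partition = (curr_depth, ) * i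
--                 all_partitions.append(new_base_partition + partition)
--         return all_partitions
--
--     return recursive_partitioning(num_list, 0)
-- ===== SOURCE B (Python) =====
-- def generate_convex_partitions(features):
--     result = []
--     stack = [(len(features), 0, ())]
--     while stack:
--         n, depth, prefix = stack.pop()
--         result.append(prefix + (depth,) * n)
--         for i in range(n - 1, 0, -1):
--             stack.append((n - i, depth + 1, prefix + (depth,) * i))
--     return result
-- ===== Notes on version B (the rewrite author's own statement) =====
-- stated objective: alternative
-- what changed: Replaces A's recursive helper (recursion on the suffix list, concatenating sub-results) with an iterative pre-order DFS over an explicit stack of (suffix-length, depth, prefix) frames, pushing children in reverse so the single result list is emitted in A's exact order.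
import Mathlib
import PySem

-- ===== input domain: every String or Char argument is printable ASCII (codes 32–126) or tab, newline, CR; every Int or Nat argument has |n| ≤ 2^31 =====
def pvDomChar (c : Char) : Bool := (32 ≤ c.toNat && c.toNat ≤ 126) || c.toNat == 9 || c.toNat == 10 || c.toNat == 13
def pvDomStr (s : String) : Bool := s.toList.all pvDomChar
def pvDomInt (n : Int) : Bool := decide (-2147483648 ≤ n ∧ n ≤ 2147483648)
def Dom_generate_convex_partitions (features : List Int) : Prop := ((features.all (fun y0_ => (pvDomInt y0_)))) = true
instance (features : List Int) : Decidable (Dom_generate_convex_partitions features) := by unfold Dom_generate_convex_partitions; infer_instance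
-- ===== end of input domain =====

-- B replaces A's call-stack recursion by an explicit-stack pre-order DFS loop (objective: alternative).

-- ===== PORT A =====
-- recursive_partitioning(curr_list, curr_depth): recursion on the suffix list curr_list[i:];
-- the for-loop over i in range(1, len(curr_list)) appending the prefixed sub-partitions is
-- this flatMap in the same order ('x.2', the range membership, is used only for termination).
def recursive_partitioning (curr_list : List Int) (curr_depth : Int) : List (List Int) :=
  List.replicate curr_list.length curr_depth ::
    (List.range' 1 (curr_list.length - 1)).attach.flatMap (fun x =>
      (recursive_partitioning (curr_list.drop x.1) (curr_depth + 1)).map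
        (fun partition => List.replicate x.1 curr_depth ++ partition))
termination_by curr_list.length
decreasing_by
  have h := (List.mem_range'_1).1 x.2
  simp only [List.length_drop]
  omega

def generate_convex_partitions (features : List Int) : List (List Int) :=
  -- num_list = [i for i in range(num_features)] (num_features = len(features) ≥ 0, so exact)
  let num_list : List Int := (List.range features.length).map Int.ofNat
  recursive_partitioning num_list 0

-- ===== PORT B =====
-- Weight of the explicit stack; used only for termination of the while-loop.
def pvStackWeight (stack : List (Nat × Int × List Int)) : Nat :=
  (stack.map (fun f => 2 ^ f.1)).sum

theorem pvPowSum : ∀ (m n : Nat), m ≤ n →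
    ((List.range' 1 m).map (fun i => 2 ^ (n - i))).sum + 2 ^ (n - m) = 2 ^ n := by
  intro m
  induction m with
  | zero => intro n _; simp
  | succ m ih =>
    intro n h
    rw [List.range'_1_concat, List.map_append, List.sum_append]
    have := ih n (by omega)
    have he : 1 + m = m + 1 := by omega
    simp only [List.map_cons, List.map_nil, List.sum_cons, List.sum_nil, he]
    have h2 : 2 ^ (n - m) = 2 ^ (n - (m + 1)) + 2 ^ (n - (m + 1)) := by
      have hm : n - m = (n - (m + 1)) + 1 := by omega
      rw [hm, pow_succ]; ring
    omega

theorem pvPushWeight (n : Nat) (d : Int) (pre : List Int)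
    (rest : List (Nat × Int × List Int))
    (f : Nat → Nat × Int × List Int) (hf : ∀ i, (f i).1 = n - i) :
    pvStackWeight ((List.range' 1 (n - 1)).map f ++ rest) < pvStackWeight ((n, d, pre) :: rest) := by
  unfold pvStackWeight
  simp only [List.map_append, List.sum_append, List.map_map, List.map_cons, List.sum_cons]
  have h1 : ((List.range' 1 (n - 1)).map ((fun f => 2 ^ f.1) ∘ f)).sum
      = ((List.range' 1 (n - 1)).map (fun i => 2 ^ (n - i))).sum := by
    apply congrArg; apply List.map_congr_left; intro i _; simp [hf i]
  rw [h1]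
  have h2 := pvPowSum (n - 1) n (by omega)
  have h3 : 1 ≤ 2 ^ (n - (n - 1)) := Nat.one_le_two_pow
  omega

-- foldl-push of the reversed range (the for-loop pushing the children); for termination.
theorem pvFoldPush {α β : Type} (l : List α) (f : α → β) (st : List β) :
    l.foldl (fun st i => f i :: st) st = l.reverse.map f ++ st := by
  induction l generalizing st with
  | nil => simp
  | cons a l ih => simp [ih]

-- while stack: pop a frame, emit its partition, push the children in reverse order.
def pvDfsLoop (stack : List (Nat × Int × List Int)) (result : List (List Int)) :
    List (List Int) :=
  match stack with
  | [] => result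
  | (n, depth, pre) :: rest =>
    -- for i in range(n-1, 0, -1): stack.append(...)   (push = cons on the Lean stack)
    let stack' := ((List.range' 1 (n - 1)).reverse).foldl
      (fun st i => (n - i, depth + 1, pre ++ List.replicate i depth) :: st) rest
    pvDfsLoop stack' (result ++ [pre ++ List.replicate n depth])
termination_by pvStackWeight stack
decreasing_by
  rw [pvFoldPush, List.reverse_reverse]
  exact pvPushWeight n depth pre rest _ (fun i => rfl)

def generate_convex_partitions_alt (features : List Int) : List (List Int) :=
  pvDfsLoop [(features.length, 0, [])] []

-- ===== PRECONDITION & SPEC =====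
def Spec_generate_convex_partitions (features : List Int) (out : List (List Int)) : Prop := out = generate_convex_partitions_alt features
instance (features : List Int) (out : List (List Int)) : Decidable (Spec_generate_convex_partitions features out) := by unfold Spec_generate_convex_partitions; infer_instance

-- ===== CLAIM (what is proved, stated in full; the proofs are below) =====
def Claim_equal_generate_convex_partitions : Prop := ∀ (features : List Int), Dom_generate_convex_partitions features → Spec_generate_convex_partitions features (generate_convex_partitions features)

-- ===== LEMMAS AND PROOFS =====

theorem pvFlatMapAttach {α β : Type} (l : List α) (f : α → List β) :
    l.attach.flatMap (fun x => f x.1) = l.flatMap f := by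
  rw [← List.flatMap_map, List.attach_map_subtype_val]

-- canonical shape of A's recursion: it depends only on the length of the list
def pvShape (n : Nat) (d : Int) : List (List Int) :=
  List.replicate n d ::
    (List.range' 1 (n - 1)).attach.flatMap (fun x =>
      (pvShape (n - x.1) (d + 1)).map (fun p => List.replicate x.1 d ++ p))
termination_by n
decreasing_by
  have h := (List.mem_range'_1).1 x.2
  omega

theorem recPart_shape : ∀ (curr : List Int) (d : Int),
    recursive_partitioning curr d = pvShape curr.length d := by
  intro curr d
  induction hn : curr.length using Nat.strong_induction_on generalizing curr d with
  | _ n ih =>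
  subst hn
  rw [recursive_partitioning, pvShape]
  congr 1
  rw [pvFlatMapAttach _ (fun i =>
        (recursive_partitioning (curr.drop i) (d + 1)).map
          (fun p => List.replicate i d ++ p)),
      pvFlatMapAttach _ (fun i =>
        (pvShape (curr.length - i) (d + 1)).map (fun p => List.replicate i d ++ p))]
  apply List.flatMap_congr
  intro i hi
  have h := (List.mem_range'_1).1 hi
  have hlen : (curr.drop i).length = curr.length - i := by simp
  rw [ih (curr.length - i) (by omega) _ _ hlen]

theorem pvDfsLoop_eq : ∀ (stack : List (Nat × Int × List Int)) (result : List (List Int)),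
    pvDfsLoop stack result =
      result ++ stack.flatMap (fun f => (pvShape f.1 f.2.1).map (f.2.2 ++ ·)) := by
  intro stack
  induction hw : pvStackWeight stack using Nat.strong_induction_on generalizing stack with
  | _ w ih =>
  subst hw
  match stack with
  | [] => intro result; simp [pvDfsLoop]
  | (n, depth, pre) :: rest =>
    intro result
    rw [pvDfsLoop]
    simp only [pvFoldPush, List.reverse_reverse]
    rw [ih _ (pvPushWeight n depth pre rest _ (fun i => rfl)) _ rfl]
    rw [List.flatMap_append, List.flatMap_map]
    conv_rhs => rw [List.flatMap_cons]
    rw [pvShape]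
    simp only [List.map_cons, List.map_flatMap]
    rw [pvFlatMapAttach _ (fun i =>
      ((pvShape (n - i) (depth + 1)).map (fun p => List.replicate i depth ++ p)).map
        (pre ++ ·))]
    simp only [List.map_map, Function.comp_def, List.append_assoc,
      List.cons_append, List.nil_append]

-- ===== VERDICT (by name: the statement is the Claim_ definition above) =====
theorem generate_convex_partitions_spec : Claim_equal_generate_convex_partitions := by
  intro features _
  unfold Spec_generate_convex_partitions generate_convex_partitions generate_convex_partitions_alt
  rw [recPart_shape, pvDfsLoop_eq]
  simp
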